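-- pv_equiv track=rewrite | github.com/three-star-potato/docker_smell_emse | evaluate/evaluate_smell_count.py | count_smells
-- ===== SOURCE A (Python) =====
-- from collections import defaultdict, Counter
--
-- def count_smells(dockerfiles_data, severity_mapping, impact_mapping):
--     """统计问题数量和严重级别"""
--     smell_count = Counter()       # 问题类型计数
--     severity_count = Counter()    # 严重级别计数
--     impact_count = Counter()      # 功能影响类别计数
--     missing_severity = set()      # 缺少严重性定义的规则
--     missing_impact = set()         # 缺少功能影响定义的规则
--     smell_details = defaultdict(list)  # 存储每个问题类型的详细信息
--     no_smell_count = 0            # 完全没有问题的Dockerfile计数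
--
--     for dockerfile in dockerfiles_data:
--         issues = dockerfile.get('issues', [])
--         has_smell = False
--
--         for issue in issues:
--             if issue.startswith("-:"):
--                 has_smell = True
--                 parts = issue.split()
--                 if len(parts) >= 2:
--                     issue_type = parts[1]  # 获取问题类型 (如 DL3008)
--                     smell_count[issue_type] += 1
--                     smell_details[issue_type].append(issue)  # 存储完整的问题描述
--
--                     # 获取严重级别
--                     if issue_type in severity_mapping:
--                         severity = severity_mapping[issue_type]
--                     else:
--                         severity = "Unknown"
--                         missing_severity.add(issue_type)
--                     severity_count[severity] += 1
--
--                     # 获取功能影响类别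
--                     if issue_type in impact_mapping:
--                         impact = impact_mapping[issue_type]
--                     else:
--                         impact = "Unknown"
--                         missing_impact.add(issue_type)
--                     impact_count[impact] += 1
--
--         if not has_smell:
--             no_smell_count += 1
--
--     return smell_count, severity_count, impact_count, missing_severity, missing_impact, smell_details, no_smell_count
-- ===== SOURCE B (Python) =====
-- from collections import defaultdict, Counter
--
-- def count_smells(dockerfiles_data, severity_mapping, impact_mapping):
--     # Pass 1: group the recorded issues by type; count smell-free Dockerfiles.
--     smell_details = defaultdict(list)
--     no_smell_count = 0
--     for dockerfile in dockerfiles_data: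
--         issues = dockerfile.get('issues', [])
--         if not any(issue.startswith("-:") for issue in issues):
--             no_smell_count += 1
--         for issue in issues:
--             if issue.startswith("-:"):
--                 parts = issue.split()
--                 if len(parts) >= 2:
--                     smell_details[parts[1]].append(issue)
--     # Pass 2: derive every counter from the groups, one step per distinct type.
--     smell_count = Counter()
--     severity_count = Counter()
--     impact_count = Counter()
--     missing_severity = set()
--     missing_impact = set()
--     for issue_type, occurrences in smell_details.items():
--         n = len(occurrences)
--         if issue_type in severity_mapping:
--             severity = severity_mapping[issue_type]
--         else:
--             severity = "Unknown"
--             missing_severity.add(issue_type)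
--         if issue_type in impact_mapping:
--             impact = impact_mapping[issue_type]
--         else:
--             impact = "Unknown"
--             missing_impact.add(issue_type)
--         smell_count[issue_type] = n
--         severity_count[severity] += n
--         impact_count[impact] += n
--     return smell_count, severity_count, impact_count, missing_severity, missing_impact, smell_details, no_smell_count
-- ===== Notes on version B (the rewrite author's own statement) =====
-- stated objective: alternative
-- what changed: B replaces A's single loop that updates six accumulators per issue with a group-then-aggregate decomposition: pass 1 groups recorded issues by type (and counts smell-free Dockerfiles), pass 2 derives smell/severity/impact counters and the missing sets with one step per distinct issue type.
import Mathlib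
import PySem

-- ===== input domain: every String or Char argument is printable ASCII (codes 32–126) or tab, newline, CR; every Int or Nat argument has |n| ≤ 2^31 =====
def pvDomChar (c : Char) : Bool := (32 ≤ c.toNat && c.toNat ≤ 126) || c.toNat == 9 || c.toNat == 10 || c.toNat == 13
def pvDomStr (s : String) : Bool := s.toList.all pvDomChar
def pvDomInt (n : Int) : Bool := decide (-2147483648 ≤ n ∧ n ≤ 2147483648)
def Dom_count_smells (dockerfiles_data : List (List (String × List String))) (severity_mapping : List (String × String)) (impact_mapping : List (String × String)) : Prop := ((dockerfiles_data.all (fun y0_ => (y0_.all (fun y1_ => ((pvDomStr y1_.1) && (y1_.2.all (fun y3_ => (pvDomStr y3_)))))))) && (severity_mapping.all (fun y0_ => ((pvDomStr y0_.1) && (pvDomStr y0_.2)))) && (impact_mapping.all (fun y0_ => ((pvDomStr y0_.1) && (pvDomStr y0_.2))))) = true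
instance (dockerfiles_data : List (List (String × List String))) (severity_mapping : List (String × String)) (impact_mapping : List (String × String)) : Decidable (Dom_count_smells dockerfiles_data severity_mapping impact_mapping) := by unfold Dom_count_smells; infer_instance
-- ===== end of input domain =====

-- B replaces A's single loop updating six accumulators per issue by a group-by-type pass
-- followed by a per-distinct-type aggregation pass (objective: alternative decomposition).

-- ===== PORT A =====
-- A's per-issue step of the inner loop; the state is
-- (smell_count, severity_count, impact_count, missing_severity, missing_impact, smell_details, has_smell)
def countSmellsStepA (severity_mapping impact_mapping : List (String × String))
    (st : PySem.Dict String Int × PySem.Dict String Int × PySem.Dict String Int ×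
          PySem.Set String × PySem.Set String × PySem.Dict String (List String) × Bool)
    (issue : String) :
    PySem.Dict String Int × PySem.Dict String Int × PySem.Dict String Int ×
    PySem.Set String × PySem.Set String × PySem.Dict String (List String) × Bool :=
  if PySem.Str.startswith issue "-:" then
    let parts := PySem.Str.split₀ issue
    if 2 ≤ parts.length then
      let issue_type := parts.getD 1 ""   -- parts[1]; exact, guarded by len ≥ 2
      let severity := if (PySem.Dict.mk severity_mapping).contains issue_type
        then (PySem.Dict.mk severity_mapping).getD issue_type "" else "Unknown"
      let impact := if (PySem.Dict.mk impact_mapping).contains issue_type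
        then (PySem.Dict.mk impact_mapping).getD issue_type "" else "Unknown"
      ( st.1.modify issue_type 0 (· + 1),
        st.2.1.modify severity 0 (· + 1),
        st.2.2.1.modify impact 0 (· + 1),
        (if (PySem.Dict.mk severity_mapping).contains issue_type then st.2.2.2.1
          else PySem.Set.add st.2.2.2.1 issue_type),
        (if (PySem.Dict.mk impact_mapping).contains issue_type then st.2.2.2.2.1
          else PySem.Set.add st.2.2.2.2.1 issue_type),
        st.2.2.2.2.2.1.modify issue_type [] (· ++ [issue]),
        true )
    else (st.1, st.2.1, st.2.2.1, st.2.2.2.1, st.2.2.2.2.1, st.2.2.2.2.2.1, true)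
  else st

def count_smells (dockerfiles_data : List (List (String × List String))) (severity_mapping : List (String × String)) (impact_mapping : List (String × String)) : (List (String × Int)) × (List (String × Int)) × (List (String × Int)) × List String × List String × (List (String × List String)) × Int :=
  let fin := dockerfiles_data.foldl
    (fun st dockerfile =>
      let issues := (PySem.Dict.mk dockerfile).getD "issues" []
      let inner := issues.foldl (countSmellsStepA severity_mapping impact_mapping)
        (st.1, st.2.1, st.2.2.1, st.2.2.2.1, st.2.2.2.2.1, st.2.2.2.2.2.1, false)
      ( inner.1, inner.2.1, inner.2.2.1, inner.2.2.2.1, inner.2.2.2.2.1, inner.2.2.2.2.2.1,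
        if inner.2.2.2.2.2.2 then st.2.2.2.2.2.2 else st.2.2.2.2.2.2 + 1 ))
    (PySem.Dict.empty, PySem.Dict.empty, PySem.Dict.empty, PySem.Set.empty, PySem.Set.empty,
      PySem.Dict.empty, (0 : Int))
  (fin.1.items, fin.2.1.items, fin.2.2.1.items, fin.2.2.2.1, fin.2.2.2.2.1,
    fin.2.2.2.2.2.1.items, fin.2.2.2.2.2.2)

-- ===== PORT B =====
-- B's second pass: one step per distinct issue type; state is
-- (smell_count, severity_count, impact_count, missing_severity, missing_impact)
def countSmellsAltStep2 (severity_mapping impact_mapping : List (String × String))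
    (st : PySem.Dict String Int × PySem.Dict String Int × PySem.Dict String Int ×
          PySem.Set String × PySem.Set String)
    (item : String × List String) :
    PySem.Dict String Int × PySem.Dict String Int × PySem.Dict String Int ×
    PySem.Set String × PySem.Set String :=
  let issue_type := item.1
  let n : Int := item.2.length
  let severity := if (PySem.Dict.mk severity_mapping).contains issue_type
    then (PySem.Dict.mk severity_mapping).getD issue_type "" else "Unknown"
  let impact := if (PySem.Dict.mk impact_mapping).contains issue_type
    then (PySem.Dict.mk impact_mapping).getD issue_type "" else "Unknown"
  ( st.1.insert issue_type n,
    st.2.1.modify severity 0 (· + n),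
    st.2.2.1.modify impact 0 (· + n),
    (if (PySem.Dict.mk severity_mapping).contains issue_type then st.2.2.2.1
      else PySem.Set.add st.2.2.2.1 issue_type),
    (if (PySem.Dict.mk impact_mapping).contains issue_type then st.2.2.2.2
      else PySem.Set.add st.2.2.2.2 issue_type) )

def count_smells_alt (dockerfiles_data : List (List (String × List String))) (severity_mapping : List (String × String)) (impact_mapping : List (String × String)) : (List (String × Int)) × (List (String × Int)) × (List (String × Int)) × List String × List String × (List (String × List String)) × Int :=
  -- pass 1: group recorded issues by type, count smell-free Dockerfiles
  let p1 := dockerfiles_data.foldl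
    (fun (st : PySem.Dict String (List String) × Int) dockerfile =>
      let issues := (PySem.Dict.mk dockerfile).getD "issues" []
      let n := if issues.any (fun i => PySem.Str.startswith i "-:") then st.2 else st.2 + 1
      ( issues.foldl (fun d issue =>
          if PySem.Str.startswith issue "-:" then
            let parts := PySem.Str.split₀ issue
            if 2 ≤ parts.length then d.modify (parts.getD 1 "") [] (· ++ [issue]) else d
          else d) st.1,
        n ))
    (PySem.Dict.empty, (0 : Int))
  -- pass 2: aggregate per distinct type
  let p2 := p1.1.items.foldl (countSmellsAltStep2 severity_mapping impact_mapping)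
    (PySem.Dict.empty, PySem.Dict.empty, PySem.Dict.empty, PySem.Set.empty, PySem.Set.empty)
  (p2.1.items, p2.2.1.items, p2.2.2.1.items, p2.2.2.2.1, p2.2.2.2.2, p1.1.items, p1.2)

-- ===== PRECONDITION & SPEC =====
def Spec_count_smells (dockerfiles_data : List (List (String × List String))) (severity_mapping : List (String × String)) (impact_mapping : List (String × String)) (out : (List (String × Int)) × (List (String × Int)) × (List (String × Int)) × List String × List String × (List (String × List String)) × Int) : Prop := out = count_smells_alt dockerfiles_data severity_mapping impact_mapping
instance (dockerfiles_data : List (List (String × List String))) (severity_mapping : List (String × String)) (impact_mapping : List (String × String)) (out : (List (String × Int)) × (List (String × Int)) × (List (String × Int)) × List String × List String × (List (String × List String)) × Int) : Decidable (Spec_count_smells dockerfiles_data severity_mapping impact_mapping out) := by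
  unfold Spec_count_smells
  -- instance search for the 7-component product exceeds the default search size; build it stepwise
  letI i1 : DecidableEq ((List (String × List String)) × Int) := inferInstance
  letI i2 : DecidableEq (List String × (List (String × List String)) × Int) := inferInstance
  letI i3 : DecidableEq (List String × List String × (List (String × List String)) × Int) := inferInstance
  letI i4 : DecidableEq ((List (String × Int)) × List String × List String × (List (String × List String)) × Int) := inferInstance
  letI i5 : DecidableEq ((List (String × Int)) × (List (String × Int)) × List String × List String × (List (String × List String)) × Int) := inferInstance
  infer_instance

-- ===== CLAIM (what is proved, stated in full; the proofs are below) =====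
def Claim_equal_count_smells : Prop := ∀ (dockerfiles_data : List (List (String × List String))) (severity_mapping : List (String × String)) (impact_mapping : List (String × String)), Dom_count_smells dockerfiles_data severity_mapping impact_mapping → Spec_count_smells dockerfiles_data severity_mapping impact_mapping (count_smells dockerfiles_data severity_mapping impact_mapping)

-- ===== LEMMAS AND PROOFS =====

-- abbreviations for the shared data of both programs
def pvIssuesOf (df : List (String × List String)) : List String :=
  (PySem.Dict.mk df).getD "issues" []
def pvIsSmell (i : String) : Bool := PySem.Str.startswith i "-:"
def pvIsRec (i : String) : Bool := pvIsSmell i && decide (2 ≤ (PySem.Str.split₀ i).length)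
def pvTy (i : String) : String := (PySem.Str.split₀ i).getD 1 ""
def pvSevOf (m : List (String × String)) (t : String) : String :=
  if (PySem.Dict.mk m).contains t then (PySem.Dict.mk m).getD t "" else "Unknown"
def pvMiss (m : List (String × String)) (t : String) : Bool := !(PySem.Dict.mk m).contains t
def pvRecs (dfs : List (List (String × List String))) : List String :=
  (dfs.flatMap pvIssuesOf).filter pvIsRec
def pvTys (dfs : List (List (String × List String))) : List String := (pvRecs dfs).map pvTy
def pvNoSmell (dfs : List (List (String × List String))) : Nat :=
  dfs.countP (fun df => !(pvIssuesOf df).any pvIsSmell)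

-- the per-record component step functions
def pvG1 (d : PySem.Dict String Int) (i : String) : PySem.Dict String Int :=
  d.modify (pvTy i) 0 (· + 1)
def pvG2 (m : List (String × String)) (d : PySem.Dict String Int) (i : String) :
    PySem.Dict String Int := d.modify (pvSevOf m (pvTy i)) 0 (· + 1)
def pvG4 (m : List (String × String)) (s : PySem.Set String) (i : String) : PySem.Set String :=
  if (PySem.Dict.mk m).contains (pvTy i) then s else PySem.Set.add s (pvTy i)
def pvG6 (d : PySem.Dict String (List String)) (i : String) : PySem.Dict String (List String) :=
  d.modify (pvTy i) [] (· ++ [i])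

-- the canonical value both programs compute
def pvGrpItems (dfs : List (List (String × List String))) : List (String × List String) :=
  ((pvRecs dfs).foldl pvG6 PySem.Dict.empty).items
def pvCanon (dfs : List (List (String × List String)))
    (sev imp : List (String × String)) :
    (List (String × Int)) × (List (String × Int)) × (List (String × Int)) ×
    List String × List String × (List (String × List String)) × Int :=
  ( ((pvRecs dfs).foldl pvG1 PySem.Dict.empty).items,
    ((pvRecs dfs).foldl (pvG2 sev) PySem.Dict.empty).items,
    ((pvRecs dfs).foldl (pvG2 imp) PySem.Dict.empty).items,
    (pvRecs dfs).foldl (pvG4 sev) PySem.Set.empty,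
    (pvRecs dfs).foldl (pvG4 imp) PySem.Set.empty,
    pvGrpItems dfs,
    (pvNoSmell dfs : Int) )

-- A's inner loop, componentwise
theorem pvInnerA_char (sev imp : List (String × String)) (issues : List String) :
    ∀ (a b c : PySem.Dict String Int) (d e : PySem.Set String)
      (f : PySem.Dict String (List String)) (g : Bool),
    issues.foldl (countSmellsStepA sev imp) (a, b, c, d, e, f, g) =
      ( (issues.filter pvIsRec).foldl pvG1 a,
        (issues.filter pvIsRec).foldl (pvG2 sev) b,
        (issues.filter pvIsRec).foldl (pvG2 imp) c,
        (issues.filter pvIsRec).foldl (pvG4 sev) d,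
        (issues.filter pvIsRec).foldl (pvG4 imp) e,
        (issues.filter pvIsRec).foldl pvG6 f,
        g || issues.any pvIsSmell ) := by
  induction issues with
  | nil => intro a b c d e f g; simp
  | cons i is ih =>
    intro a b c d e f g
    by_cases h1 : PySem.Str.startswith i "-:"
    · by_cases h2 : 2 ≤ (PySem.Str.split₀ i).length
      · simp only [List.foldl_cons, List.filter_cons, List.any_cons, countSmellsStepA,
          pvIsRec, pvIsSmell, pvTy, pvSevOf, pvG1, pvG2, pvG4, pvG6, h1, h2,
          if_true, decide_true, Bool.and_self, Bool.true_or, Bool.or_true]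
        rw [ih]
        simp
      · simp only [List.foldl_cons, List.filter_cons, List.any_cons, countSmellsStepA,
          pvIsRec, pvIsSmell, h1, h2]
        rw [ih]
        simp
    · simp only [List.foldl_cons, List.filter_cons, List.any_cons, countSmellsStepA,
        pvIsRec, pvIsSmell, h1]
      rw [ih]
      simp

-- A's outer loop, componentwise
theorem pvOuterA_char (sev imp : List (String × String))
    (dfs : List (List (String × List String))) :
    ∀ (a b c : PySem.Dict String Int) (d e : PySem.Set String)
      (f : PySem.Dict String (List String)) (n : Int),
    dfs.foldl
      (fun st dockerfile =>
        let issues := (PySem.Dict.mk dockerfile).getD "issues" []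
        let inner := issues.foldl (countSmellsStepA sev imp)
          (st.1, st.2.1, st.2.2.1, st.2.2.2.1, st.2.2.2.2.1, st.2.2.2.2.2.1, false)
        ( inner.1, inner.2.1, inner.2.2.1, inner.2.2.2.1, inner.2.2.2.2.1, inner.2.2.2.2.2.1,
          if inner.2.2.2.2.2.2 then st.2.2.2.2.2.2 else st.2.2.2.2.2.2 + 1 ))
      (a, b, c, d, e, f, n) =
      ( (pvRecs dfs).foldl pvG1 a,
        (pvRecs dfs).foldl (pvG2 sev) b,
        (pvRecs dfs).foldl (pvG2 imp) c,
        (pvRecs dfs).foldl (pvG4 sev) d,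
        (pvRecs dfs).foldl (pvG4 imp) e,
        (pvRecs dfs).foldl pvG6 f,
        n + (pvNoSmell dfs : Int) ) := by
  induction dfs with
  | nil => intro a b c d e f n; simp [pvRecs, pvNoSmell]
  | cons df dfs ih =>
    intro a b c d e f n
    rw [List.foldl_cons]
    simp only []
    rw [pvInnerA_char]
    rw [ih]
    have hr : pvRecs (df :: dfs) =
        ((pvIssuesOf df).filter pvIsRec) ++ pvRecs dfs := by
      simp [pvRecs, List.flatMap_cons, List.filter_append]
    have hn : (pvNoSmell (df :: dfs) : Int) =
        (if ((pvIssuesOf df).any pvIsSmell) then 0 else 1) + (pvNoSmell dfs : Int) := by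
      simp only [pvNoSmell, List.countP_cons]
      by_cases h : (pvIssuesOf df).any pvIsSmell <;> simp [h] <;> omega
    rw [hr]
    simp only [List.foldl_append, Prod.mk.injEq]
    refine ⟨rfl, rfl, rfl, rfl, rfl, rfl, ?_⟩
    rw [hn]
    simp only [pvIssuesOf, Bool.false_or]
    split_ifs <;> omega

-- A computes the canonical value
theorem pvA_char (dfs : List (List (String × List String))) (sev imp : List (String × String)) :
    count_smells dfs sev imp = pvCanon dfs sev imp := by
  unfold count_smells
  rw [pvOuterA_char]
  simp [pvCanon, pvGrpItems]

-- B's pass 1: the guarded inner step is the filtered pvG6 fold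
theorem pvB1_inner (issues : List String) (d : PySem.Dict String (List String)) :
    issues.foldl (fun d issue =>
        if PySem.Str.startswith issue "-:" then
          let parts := PySem.Str.split₀ issue
          if 2 ≤ parts.length then d.modify (parts.getD 1 "") [] (· ++ [issue]) else d
        else d) d =
      (issues.filter pvIsRec).foldl pvG6 d := by
  induction issues generalizing d with
  | nil => simp
  | cons i is ih =>
    by_cases h1 : PySem.Str.startswith i "-:"
    · by_cases h2 : 2 ≤ (PySem.Str.split₀ i).length
      · simp only [List.foldl_cons, List.filter_cons, pvIsRec, pvIsSmell, h1, h2,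
          decide_true, Bool.and_self, if_true]
        rw [ih]
        simp [pvG6, pvTy]
      · simp only [List.foldl_cons, List.filter_cons, pvIsRec, pvIsSmell, h1, h2]
        rw [ih]
        simp
    · simp only [List.foldl_cons, List.filter_cons, pvIsRec, pvIsSmell, h1]
      rw [ih]
      simp

-- B's pass 1, over all Dockerfiles
theorem pvB1_char (dfs : List (List (String × List String))) :
    ∀ (f : PySem.Dict String (List String)) (n : Int),
    dfs.foldl
      (fun (st : PySem.Dict String (List String) × Int) dockerfile =>
        let issues := (PySem.Dict.mk dockerfile).getD "issues" []
        let n := if issues.any (fun i => PySem.Str.startswith i "-:") then st.2 else st.2 + 1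
        ( issues.foldl (fun d issue =>
            if PySem.Str.startswith issue "-:" then
              let parts := PySem.Str.split₀ issue
              if 2 ≤ parts.length then d.modify (parts.getD 1 "") [] (· ++ [issue]) else d
            else d) st.1,
          n ))
      (f, n) = ((pvRecs dfs).foldl pvG6 f, n + (pvNoSmell dfs : Int)) := by
  induction dfs with
  | nil => intro f n; simp [pvRecs, pvNoSmell]
  | cons df dfs ih =>
    intro f n
    rw [List.foldl_cons]
    simp only []
    rw [pvB1_inner, ih]
    have hr : pvRecs (df :: dfs) = ((pvIssuesOf df).filter pvIsRec) ++ pvRecs dfs := by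
      simp [pvRecs, List.flatMap_cons, List.filter_append]
    have hn : (pvNoSmell (df :: dfs) : Int) =
        (if ((pvIssuesOf df).any pvIsSmell) then 0 else 1) + (pvNoSmell dfs : Int) := by
      simp only [pvNoSmell, List.countP_cons]
      by_cases h : (pvIssuesOf df).any pvIsSmell <;> simp [h] <;> omega
    rw [hr]
    simp only [List.foldl_append, Prod.mk.injEq]
    refine ⟨rfl, ?_⟩
    rw [hn]
    have hpred : (fun i => PySem.Str.startswith i "-:") = pvIsSmell := rfl
    rw [hpred]
    simp only [pvIssuesOf]
    split_ifs <;> omega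

-- B's pass 2, componentwise
theorem pvB2_char (sev imp : List (String × String)) (l : List (String × List String)) :
    ∀ (a b c : PySem.Dict String Int) (d e : PySem.Set String),
    l.foldl (countSmellsAltStep2 sev imp) (a, b, c, d, e) =
      ( l.foldl (fun d p => d.insert p.1 ((p.2.length : Int))) a,
        l.foldl (fun d p => d.modify (pvSevOf sev p.1) 0 (· + (p.2.length : Int))) b,
        l.foldl (fun d p => d.modify (pvSevOf imp p.1) 0 (· + (p.2.length : Int))) c,
        l.foldl (fun s p => if (PySem.Dict.mk sev).contains p.1 then s
          else PySem.Set.add s p.1) d,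
        l.foldl (fun s p => if (PySem.Dict.mk imp).contains p.1 then s
          else PySem.Set.add s p.1) e ) := by
  induction l with
  | nil => intro a b c d e; simp
  | cons p l ih =>
    intro a b c d e
    rw [List.foldl_cons]
    have hstep : countSmellsAltStep2 sev imp (a, b, c, d, e) p =
        ( a.insert p.1 ((p.2.length : Int)),
          b.modify (pvSevOf sev p.1) 0 (· + (p.2.length : Int)),
          c.modify (pvSevOf imp p.1) 0 (· + (p.2.length : Int)),
          (if (PySem.Dict.mk sev).contains p.1 then d else PySem.Set.add d p.1),
          (if (PySem.Dict.mk imp).contains p.1 then e else PySem.Set.add e p.1) ) := rfl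
    rw [hstep]
    simp only [List.foldl_cons]
    exact ih _ _ _ _ _

-- ---------- generic list/set lemmas (stated at String, the only type used) ----------

theorem pvOfList_append_singleton (l : List String) (x : String) :
    PySem.Set.ofList (l ++ [x]) = PySem.Set.add (PySem.Set.ofList l) x := by
  rw [PySem.Set.ofList_eq_foldl, PySem.Set.ofList_eq_foldl, List.foldl_append]
  rfl

theorem pvAdd_mem (l : List String) (x : String) (h : x ∈ l) :
    PySem.Set.add (PySem.Set.ofList l) x = PySem.Set.ofList l := by
  simp [PySem.Set.add, h]

theorem pvAdd_not_mem (l : List String) (x : String) (h : x ∉ l) :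
    PySem.Set.add (PySem.Set.ofList l) x = PySem.Set.ofList l ++ [x] := by
  simp [PySem.Set.add, h]

-- dedup commutes with map (in the first-occurrence sense)
theorem pvOfList_map_ofList (f : String → String) (l : List String) :
    PySem.Set.ofList (l.map f) = PySem.Set.ofList ((PySem.Set.ofList l).map f) := by
  induction l using List.reverseRecOn with
  | nil => rfl
  | append_singleton l x ih =>
    rw [List.map_append, List.map_singleton, pvOfList_append_singleton,
      pvOfList_append_singleton]
    by_cases hx : x ∈ l
    · rw [pvAdd_mem l x hx, pvAdd_mem (l.map f) (f x) (List.mem_map_of_mem hx), ih]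
    · rw [pvAdd_not_mem l x hx, List.map_append, List.map_singleton,
        pvOfList_append_singleton, ih]

-- dedup commutes with filter
theorem pvOfList_filter_ofList (p : String → Bool) (l : List String) :
    PySem.Set.ofList (l.filter p) = PySem.Set.ofList ((PySem.Set.ofList l).filter p) := by
  induction l using List.reverseRecOn with
  | nil => rfl
  | append_singleton l x ih =>
    rw [List.filter_append]
    by_cases hp : p x
    · have hfx : List.filter p [x] = [x] := by simp [hp]
      rw [hfx, pvOfList_append_singleton, pvOfList_append_singleton]
      by_cases hx : x ∈ l
      · rw [pvAdd_mem l x hx, ih]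
        have hmem : x ∈ (PySem.Set.ofList l).filter p :=
          List.mem_filter.2 ⟨(PySem.Set.mem_ofList l x).2 hx, hp⟩
        exact pvAdd_mem _ _ hmem
      · rw [pvAdd_not_mem l x hx, List.filter_append, hfx, pvOfList_append_singleton, ih]
    · have hfx : List.filter p [x] = [] := by simp [hp]
      rw [hfx, List.append_nil, ih]
      by_cases hx : x ∈ l
      · rw [pvOfList_append_singleton, pvAdd_mem l x hx]
      · rw [pvOfList_append_singleton, pvAdd_not_mem l x hx, List.filter_append, hfx,
          List.append_nil]

-- sum of an equality indicator over a Nodup list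
theorem pvSum_indicator (x : String) (l : List String) (hnd : l.Nodup) :
    (l.map (fun t => if x = t then (1:Int) else 0)).sum = if x ∈ l then 1 else 0 := by
  induction l with
  | nil => simp
  | cons y ys ih =>
    rcases List.nodup_cons.1 hnd with ⟨hy, hys⟩
    by_cases hxy : x = y
    · subst hxy
      have hz : (ys.map (fun t => if x = t then (1:Int) else 0)).sum = 0 := by
        apply List.sum_eq_zero
        intro z hz
        rcases List.mem_map.1 hz with ⟨t, ht, rfl⟩
        have : x ≠ t := fun h => hy (h ▸ ht)
        simp [this]
      simp [hz]
    · have := ih hys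
      simp only [List.map_cons, List.sum_cons, if_false, List.mem_cons, this]
      simp [hxy]

-- a countP splits into per-first-occurrence counts
theorem pvCountP_eq_sum (l : List String) (p : String → Bool) :
    (l.countP p : Int) =
      (((PySem.Set.ofList l).filter p).map (fun t => (l.count t : Int))).sum := by
  induction l using List.reverseRecOn with
  | nil => rfl
  | append_singleton l x ih =>
    rw [List.countP_append, pvOfList_append_singleton]
    have hsplit : ∀ (L : List String),
        (L.map (fun t => ((l ++ [x]).count t : Int))).sum =
          (L.map (fun t => (l.count t : Int))).sum +
          (L.map (fun t => if x = t then (1:Int) else 0)).sum := by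
      intro L
      induction L with
      | nil => simp
      | cons y ys ihy =>
        simp only [List.map_cons, List.sum_cons, ihy]
        have : ((l ++ [x]).count y : Int) = (l.count y : Int) + (if x = y then 1 else 0) := by
          rw [List.count_append]
          by_cases h : x = y
          · subst h; simp [List.count_singleton]
          · have : ¬ (y == x) = true := by simp; exact fun hh => h hh.symm
            simp [List.count_singleton, this]
        rw [this]
        ring
    by_cases hx : x ∈ l
    · rw [pvAdd_mem l x hx, hsplit]
      have hnd : ((PySem.Set.ofList l).filter p).Nodup := (PySem.Set.nodup_ofList l).filter p
      have hmem : x ∈ (PySem.Set.ofList l).filter p ↔ p x = true := by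
        simp [List.mem_filter, PySem.Set.mem_ofList, hx]
      rw [pvSum_indicator x _ hnd, ← ih]
      by_cases hp : p x
      · simp [hp, hmem, List.countP_singleton]
      · simp [hp, hmem]
    · rw [pvAdd_not_mem l x hx, List.filter_append]
      by_cases hp : p x
      · have hfx : List.filter p [x] = [x] := by simp [hp]
        rw [hfx, List.map_append, List.sum_append, hsplit]
        have hzero : (((PySem.Set.ofList l).filter p).map
            (fun t => if x = t then (1:Int) else 0)).sum = 0 := by
          apply List.sum_eq_zero
          intro z hz
          rcases List.mem_map.1 hz with ⟨t, ht, rfl⟩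
          have htl : t ∈ l := (PySem.Set.mem_ofList l t).1 (List.mem_filter.1 ht).1
          have : x ≠ t := fun h => hx (h ▸ htl)
          simp [this]
        rw [hzero, ← ih]
        have hxcnt : ((l ++ [x]).count x : Int) = 1 := by
          rw [List.count_append]
          simp [List.count_eq_zero_of_not_mem hx]
        simp [hxcnt, hp, List.countP_singleton, List.count_eq_zero_of_not_mem hx]
      · have hfx : List.filter p [x] = [] := by simp [hp]
        rw [hfx, List.append_nil, hsplit]
        have hzero : (((PySem.Set.ofList l).filter p).map
            (fun t => if x = t then (1:Int) else 0)).sum = 0 := by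
          apply List.sum_eq_zero
          intro z hz
          rcases List.mem_map.1 hz with ⟨t, ht, rfl⟩
          have htl : t ∈ l := (PySem.Set.mem_ofList l t).1 (List.mem_filter.1 ht).1
          have : x ≠ t := fun h => hx (h ▸ htl)
          simp [this]
        rw [hzero, ← ih]
        simp [hp]

-- getD of a weighted counting fold
theorem pvWfold_getD {β : Type} (l : List β) (k : β → String) (w : β → Int) :
    ∀ (d : PySem.Dict String Int) (s : String),
    (l.foldl (fun d t => d.modify (k t) 0 (· + w t)) d).getD s 0 =
      d.getD s 0 + ((l.filter (fun t => k t == s)).map w).sum := by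
  induction l with
  | nil => intro d s; simp
  | cons t l ih =>
    intro d s
    rw [List.foldl_cons, ih, PySem.Dict.getD_modify]
    by_cases h : s = k t
    · simp [List.filter_cons, h]
      ring
    · have : ¬ (k t == s) := by simp; exact fun hh => h hh.symm
      simp [List.filter_cons, this]
      simp [h]

-- items of a weighted counting fold
theorem pvWfold_items {β : Type} (l : List β) (k : β → String) (w : β → Int) :
    (l.foldl (fun d t => d.modify (k t) 0 (· + w t)) PySem.Dict.empty).items =
      (PySem.Set.ofList (l.map k)).map
        (fun s => (s, ((l.filter (fun t => k t == s)).map w).sum)) := by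
  have hkeys : (l.foldl (fun d t => d.modify (k t) 0 (· + w t)) PySem.Dict.empty).keys =
      PySem.Set.ofList (l.map k) := by
    rw [PySem.Dict.keys_foldl_modify_key l k 0 (fun _ t v => v + w t) PySem.Dict.empty]
    rfl
  have hnd : (l.foldl (fun d t => d.modify (k t) 0 (· + w t)) PySem.Dict.empty).keys.Nodup := by
    apply PySem.Dict.nodup_keys_foldl_modify_key
    simp [PySem.Dict.empty]
  rw [PySem.Dict.items_eq_map_keys _ hnd 0, hkeys]
  apply List.map_congr_left
  intro s _
  rw [pvWfold_getD]
  simp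

-- the grouped dictionary's items
theorem pvGrp_items (rs : List String) :
    ((rs.foldl pvG6 PySem.Dict.empty).items) =
      (PySem.Set.ofList (rs.map pvTy)).map
        (fun t => (t, rs.filter (fun i => pvTy i == t))) := by
  have hkeys : (rs.foldl pvG6 PySem.Dict.empty).keys = PySem.Set.ofList (rs.map pvTy) := by
    unfold pvG6
    rw [PySem.Dict.keys_foldl_modify_key rs pvTy [] (fun _ i v => v ++ [i]) PySem.Dict.empty]
    rfl
  have hnd : (rs.foldl pvG6 PySem.Dict.empty).keys.Nodup := by
    unfold pvG6
    apply PySem.Dict.nodup_keys_foldl_modify_key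
    simp [PySem.Dict.empty]
  rw [PySem.Dict.items_eq_map_keys _ hnd [], hkeys]
  apply List.map_congr_left
  intro t _
  have hfold : rs.foldl pvG6 PySem.Dict.empty =
      (rs.map (fun i => (pvTy i, i))).foldl
        (fun d p => d.modify p.1 [] (· ++ [p.2])) PySem.Dict.empty := by
    rw [List.foldl_map]
    rfl
  rw [hfold, PySem.Dict.getD_foldl_modify_append]
  simp [List.filter_map, Function.comp_def]

-- conditional add fold = add fold over the filtered list
theorem pvFoldl_skip {σ α : Type} (c : α → Bool) (g : σ → α → σ) (l : List α) :
    ∀ (s : σ), l.foldl (fun s x => if c x then s else g s x) s =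
      (l.filter (fun x => !c x)).foldl g s := by
  induction l with
  | nil => intro s; simp
  | cons x l ih =>
    intro s
    by_cases h : c x <;> simp [List.foldl_cons, h, ih]

-- missing-set folds compute ofList of the filtered types
theorem pvMs_char (m : List (String × String)) (rs : List String) :
    rs.foldl (pvG4 m) PySem.Set.empty =
      PySem.Set.ofList ((rs.map pvTy).filter (pvMiss m)) := by
  unfold pvG4
  rw [pvFoldl_skip (fun i => (PySem.Dict.mk m).contains (pvTy i))
    (fun s i => PySem.Set.add s (pvTy i)) rs]
  have h1 : (rs.filter (fun i => !(PySem.Dict.mk m).contains (pvTy i))).foldl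
        (fun s i => PySem.Set.add s (pvTy i)) PySem.Set.empty =
      ((rs.filter (fun i => !(PySem.Dict.mk m).contains (pvTy i))).map pvTy).foldl
        PySem.Set.add [] := by
    rw [List.foldl_map]
    rfl
  rw [h1, ← PySem.Set.ofList_eq_foldl]
  congr 1
  simp [List.filter_map, Function.comp_def, pvMiss]

-- B's missing-set fold over the distinct types
theorem pvMsB_char (m : List (String × String)) (D : List String) :
    D.foldl (fun s t => if (PySem.Dict.mk m).contains t then s else PySem.Set.add s t)
        PySem.Set.empty =
      PySem.Set.ofList (D.filter (pvMiss m)) := by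
  rw [pvFoldl_skip (fun t => (PySem.Dict.mk m).contains t) (fun s t => PySem.Set.add s t) D]
  rw [PySem.Set.ofList_eq_foldl]
  rfl

-- sum of constant ones is the length
theorem pvSum_ones {α : Type} (l : List α) : (l.map (fun _ => (1:Int))).sum = (l.length : Int) := by
  induction l with
  | nil => rfl
  | cons x l ih => simp [ih]; ring

-- the two severity/impact counters agree
theorem pvVC_eq (m : List (String × String)) (rs : List String) :
    ((PySem.Set.ofList (rs.map pvTy)).foldl
        (fun d t => d.modify (pvSevOf m t) 0
          (· + ((rs.filter (fun i => pvTy i == t)).length : Int)))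
        PySem.Dict.empty).items =
      ((rs.foldl (pvG2 m) PySem.Dict.empty).items) := by
  have hL := pvWfold_items (PySem.Set.ofList (rs.map pvTy)) (pvSevOf m)
    (fun t => ((rs.filter (fun i => pvTy i == t)).length : Int))
  have hR := pvWfold_items rs (fun i => pvSevOf m (pvTy i)) (fun _ => (1:Int))
  have hR' : (rs.foldl (pvG2 m) PySem.Dict.empty).items =
      (PySem.Set.ofList (rs.map (fun i => pvSevOf m (pvTy i)))).map
        (fun s => (s, ((rs.filter (fun i => pvSevOf m (pvTy i) == s)).map
          (fun _ => (1:Int))).sum)) := by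
    rw [← hR]; rfl
  rw [hL, hR']
  have hkeys : PySem.Set.ofList (rs.map (fun i => pvSevOf m (pvTy i))) =
      PySem.Set.ofList ((PySem.Set.ofList (rs.map pvTy)).map (pvSevOf m)) := by
    have : rs.map (fun i => pvSevOf m (pvTy i)) = (rs.map pvTy).map (pvSevOf m) := by
      rw [List.map_map]; rfl
    rw [this, pvOfList_map_ofList]
  rw [hkeys]
  apply List.map_congr_left
  intro s _
  have hval : ((rs.filter (fun i => pvSevOf m (pvTy i) == s)).map (fun _ => (1:Int))).sum =
      (((rs.map pvTy).filter (fun t => pvSevOf m t == s)).map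
        (fun _ => (1:Int))).sum := by
    rw [List.filter_map]
    simp [Function.comp_def]
  rw [hval, pvSum_ones]
  have hcountP : (((rs.map pvTy).filter (fun t => pvSevOf m t == s)).length : Int) =
      ((rs.map pvTy).countP (fun t => pvSevOf m t == s) : Int) := by
    rw [List.countP_eq_length_filter]
  rw [hcountP, pvCountP_eq_sum (rs.map pvTy) (fun t => pvSevOf m t == s)]
  simp only [Prod.mk.injEq, true_and]
  congr 1
  apply List.map_congr_left
  intro t _
  rw [List.count_eq_countP, List.countP_map, List.countP_eq_length_filter]
  rfl

-- B computes the canonical value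
theorem pvB_char (dfs : List (List (String × List String))) (sev imp : List (String × String)) :
    count_smells_alt dfs sev imp = pvCanon dfs sev imp := by
  unfold count_smells_alt
  rw [pvB1_char]
  simp only []
  rw [pvB2_char]
  set rs := pvRecs dfs with hrs
  set D := PySem.Set.ofList (rs.map pvTy) with hD
  have hitems : ((rs.foldl pvG6 PySem.Dict.empty).items) =
      D.map (fun t => (t, rs.filter (fun i => pvTy i == t))) := pvGrp_items rs
  unfold pvCanon
  simp only [Prod.mk.injEq]
  refine ⟨?_, ?_, ?_, ?_, ?_, rfl, by omega⟩
  -- smell_count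
  · rw [hitems]
    have h2 : (D.map (fun t => (t, rs.filter (fun i => pvTy i == t)))).foldl
        (fun d p => d.insert p.1 ((p.2.length : Int))) PySem.Dict.empty =
      D.foldl (fun d t => d.insert t (((rs.filter (fun i => pvTy i == t)).length : Int)))
        PySem.Dict.empty := by
      rw [List.foldl_map]
    rw [h2]
    rw [PySem.Dict.items_foldl_insert_fresh D (fun t => t)
      (fun t => ((rs.filter (fun i => pvTy i == t)).length : Int)) PySem.Dict.empty
      (by intro a _; simp [PySem.Dict.empty, PySem.Dict.contains_mk])
      (by simp only [List.map_id']; rw [hD]; exact PySem.Set.nodup_ofList _)]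
    have hAc : rs.foldl pvG1 PySem.Dict.empty = PySem.Dict.counter (rs.map pvTy) := by
      rw [PySem.Dict.counter_eq_foldl, List.foldl_map]
      rfl
    rw [hAc, PySem.Dict.items_counter]
    simp only [← hD]
    apply List.map_congr_left
    intro t _
    simp only [Prod.mk.injEq, true_and]
    rw [List.count_eq_countP, List.countP_map, List.countP_eq_length_filter]
    simp [Function.comp_def]
  -- severity_count
  · rw [hitems]
    have h2 : (D.map (fun t => (t, rs.filter (fun i => pvTy i == t)))).foldl
        (fun d p => d.modify (pvSevOf sev p.1) 0 (· + (p.2.length : Int))) PySem.Dict.empty =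
      D.foldl (fun d t => d.modify (pvSevOf sev t) 0
        (· + (((rs.filter (fun i => pvTy i == t)).length : Int)))) PySem.Dict.empty := by
      rw [List.foldl_map]
    rw [h2]
    exact pvVC_eq sev rs
  -- impact_count
  · rw [hitems]
    have h2 : (D.map (fun t => (t, rs.filter (fun i => pvTy i == t)))).foldl
        (fun d p => d.modify (pvSevOf imp p.1) 0 (· + (p.2.length : Int))) PySem.Dict.empty =
      D.foldl (fun d t => d.modify (pvSevOf imp t) 0
        (· + (((rs.filter (fun i => pvTy i == t)).length : Int)))) PySem.Dict.empty := by
      rw [List.foldl_map]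
    rw [h2]
    exact pvVC_eq imp rs
  -- missing_severity
  · rw [hitems]
    have h2 : (D.map (fun t => (t, rs.filter (fun i => pvTy i == t)))).foldl
        (fun s p => if (PySem.Dict.mk sev).contains p.1 then s else PySem.Set.add s p.1)
          PySem.Set.empty =
      D.foldl (fun s t => if (PySem.Dict.mk sev).contains t then s else PySem.Set.add s t)
        PySem.Set.empty := by
      rw [List.foldl_map]
    rw [h2, pvMsB_char sev D, pvMs_char sev rs, hD]
    exact (pvOfList_filter_ofList (pvMiss sev) (rs.map pvTy)).symm
  -- missing_impact
  · rw [hitems]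
    have h2 : (D.map (fun t => (t, rs.filter (fun i => pvTy i == t)))).foldl
        (fun s p => if (PySem.Dict.mk imp).contains p.1 then s else PySem.Set.add s p.1)
          PySem.Set.empty =
      D.foldl (fun s t => if (PySem.Dict.mk imp).contains t then s else PySem.Set.add s t)
        PySem.Set.empty := by
      rw [List.foldl_map]
    rw [h2, pvMsB_char imp D, pvMs_char imp rs, hD]
    exact (pvOfList_filter_ofList (pvMiss imp) (rs.map pvTy)).symm

-- ===== VERDICT (by name: the statement is the Claim_ definition above) =====
theorem count_smells_spec : Claim_equal_count_smells := by
  intro dfs sev imp _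
  unfold Spec_count_smells
  rw [pvA_char, pvB_char]
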